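-- pv_equiv track=rewrite | github.com/AdamZhouSE/pythonHomework | Code/CodeRecords/2948/60746/311924.py | fate
-- ===== SOURCE A (Python) =====
-- def ToNum(N,S):
--     n=len(N)
--     new=[]
--     for i in range(0,n-1):
--         a=S+ord(N[i])-97
--         new.append(a)
--     return new
--
-- def fate(N,S):
--     new=ToNum(N,S)
--     nn=len(new)
--     t=nn+1
--     for i in range(nn):
--         t=t-1
--         for j in range(t-1):
--             new[j]=new[j]+new[j+1]
--     return new[0]
-- ===== SOURCE B (Python) =====
-- def fate(N, S):
--     # one pass: sum of C(m-1,k) * (S + ord(N[k]) - 97) with incrementally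
--     # updated binomial coefficients
--     m = len(N) - 1
--     total = 0
--     c = 1
--     for k in range(m):
--         total += c * (S + ord(N[k]) - 97)
--         c = c * (m - 1 - k) // (k + 1)
--     return total
-- ===== Notes on version B (the rewrite author's own statement) =====
-- stated objective: faster
-- what changed: A builds the letter-value list and collapses it with n nested in-place adjacent-sum passes (Pascal's triangle); B computes the same result in one pass as the binomial-weighted sum sum_k C(m-1,k)*(S+ord(N[k])-97) with the binomial coefficient updated incrementally by c = c*(m-1-k)//(k+1).
import Mathlib
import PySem

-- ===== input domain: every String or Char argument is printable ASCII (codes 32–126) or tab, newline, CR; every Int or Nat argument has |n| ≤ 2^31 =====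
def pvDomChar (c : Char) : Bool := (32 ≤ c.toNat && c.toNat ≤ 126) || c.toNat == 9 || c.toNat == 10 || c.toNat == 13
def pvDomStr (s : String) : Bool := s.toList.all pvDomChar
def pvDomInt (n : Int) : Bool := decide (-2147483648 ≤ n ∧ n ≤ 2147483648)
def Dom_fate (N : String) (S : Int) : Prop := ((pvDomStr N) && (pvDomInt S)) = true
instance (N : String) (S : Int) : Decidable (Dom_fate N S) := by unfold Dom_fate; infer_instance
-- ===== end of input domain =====

-- B replaces A's O(n^2) nested adjacent-sum passes by a single pass computing the
-- binomial-weighted sum with incrementally updated binomial coefficients (objective: faster).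

-- ===== PORT A =====
-- ToNum: for i in range(0, n-1): new.append(S + ord(N[i]) - 97)
def pvToNum (N : String) (S : Int) : List Int :=
  (N.toList.take (N.toList.length - 1)).map (fun c => S + (c.toNat : Int) - 97)

-- inner loop: 'for j in range(t-1): new[j] = new[j] + new[j+1]'  (in place, j increasing;
-- second argument = number of remaining updates t-1)
def pvPass : List Int → Nat → List Int
  | a :: b :: rest, Nat.succ k => (a + b) :: pvPass (b :: rest) k
  | xs, _ => xs

-- outer loop: 'for i in range(nn): t = t - 1; <inner loop>' ; t counts down nn, nn-1, …, 1
def pvOuter : List Int → Nat → List Int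
  | xs, 0 => xs
  | xs, Nat.succ m => pvOuter (pvPass xs m) m

def fate (N : String) (S : Int) : Int :=
  let new := pvToNum N S
  PySem.List.pyGetD (pvOuter new new.length) 0 0   -- 'return new[0]' (in range under Pre_fate)

-- ===== PORT B =====
-- 'for k in range(m): total += c * (S + ord(N[k]) - 97); c = c * (m - 1 - k) // (k + 1)'
def pvAltLoop (S mI : Int) : List Char → Nat → Int → Int → Int
  | [], _, _, total => total
  | ch :: rest, k, c, total =>
      pvAltLoop S mI rest (k + 1)
        (PySem.Int.floordiv (c * (mI - 1 - (k : Int))) ((k : Int) + 1))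
        (total + c * (S + (ch.toNat : Int) - 97))

def fate_alt (N : String) (S : Int) : Int :=
  pvAltLoop S ((N.toList.length : Int) - 1) (N.toList.take (N.toList.length - 1)) 0 1 0

-- ===== PRECONDITION & SPEC =====
-- Pre_ excludes strings of length ≤ 1, on which A raises IndexError (new[0] on the empty list).
def Pre_fate (N : String) (S : Int) : Prop := 2 ≤ N.toList.length
instance (N : String) (S : Int) : Decidable (Pre_fate N S) := by unfold Pre_fate; infer_instance
def pvWitness_fate : String × Int := ("ab", 3)

def Spec_fate (N : String) (S : Int) (out : Int) : Prop := out = fate_alt N S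
instance (N : String) (S : Int) (out : Int) : Decidable (Spec_fate N S out) := by unfold Spec_fate; infer_instance

-- ===== CLAIM (what is proved, stated in full; the proofs are below) =====
def Claim_equal_fate : Prop := ∀ (N : String) (S : Int), Dom_fate N S → Pre_fate N S → Spec_fate N S (fate N S)

-- ===== LEMMAS AND PROOFS =====

-- weighted sum Σ_i C(r, k+i) * xs_i
def csum (r : Nat) : Nat → List Int → Int
  | _, [] => 0
  | k, v :: vs => (Nat.choose r k : Int) * v + csum r (k + 1) vs

theorem pvPass_zero (xs : List Int) : pvPass xs 0 = xs := by
  cases xs with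
  | nil => rfl
  | cons a t => cases t <;> rfl

theorem pvPass_length (xs : List Int) (p : Nat) : (pvPass xs p).length = xs.length := by
  induction p generalizing xs with
  | zero => rw [pvPass_zero]
  | succ q ih =>
    cases xs with
    | nil => rfl
    | cons a t =>
      cases t with
      | nil => rfl
      | cons b rest => simpa [pvPass] using ih (b :: rest)

theorem csum_append (r : Nat) (as bs : List Int) : ∀ k, csum r k (as ++ bs) = csum r k as + csum r (k + as.length) bs := by
  induction as with
  | nil => intro k; simp [csum]
  | cons a as' ih =>
    intro k
    simp only [List.cons_append, csum, ih (k + 1), List.length_cons]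
    have : k + 1 + as'.length = k + (as'.length + 1) := by omega
    rw [this]; ring

theorem csum_zero_of_lt (r : Nat) (zs : List Int) : ∀ k, r < k → csum r k zs = 0 := by
  induction zs with
  | nil => intro k _; rfl
  | cons v vs ih =>
    intro k hk
    simp [csum, Nat.choose_eq_zero_of_lt hk, ih (k + 1) (by omega)]

theorem csum_take (r : Nat) (zs : List Int) : csum r 0 (zs.take (r + 1)) = csum r 0 zs := by
  by_cases h : zs.length ≤ r + 1
  · rw [List.take_of_length_le h]
  · conv_rhs => rw [← List.take_append_drop (r + 1) zs]
    rw [csum_append]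
    have hl : (zs.take (r + 1)).length = r + 1 := by
      simp [List.length_take]; omega
    rw [hl, csum_zero_of_lt r _ (0 + (r + 1)) (by omega)]
    ring

theorem pass_take (p : Nat) : ∀ (xs : List Int), p + 1 ≤ xs.length →
    (pvPass xs p).take (p + 1) = pvPass (xs.take (p + 1)) p := by
  induction p with
  | zero =>
    intro xs _
    rw [pvPass_zero, pvPass_zero]
  | succ q ih =>
    intro xs hlen
    match xs with
    | a :: b :: rest =>
      have h2 : q + 1 ≤ (b :: rest).length := by
        simp only [List.length_cons] at hlen ⊢; omega
      simp only [pvPass, List.take_succ_cons]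
      rw [ih (b :: rest) h2]
      rfl

theorem pass_csum_succ (p : Nat) : ∀ (xs : List Int) (r k : Nat), xs.length = p + 1 →
    csum r (k + 1) (pvPass xs p) =
      csum (r + 1) (k + 1) xs - (Nat.choose r k : Int) * xs.headI := by
  induction p with
  | zero =>
    intro xs r k hlen
    match xs with
    | [a] =>
      simp only [pvPass_zero, csum, List.headI]
      have : (Nat.choose (r + 1) (k + 1) : Int) = (Nat.choose r k : Int) + (Nat.choose r (k + 1) : Int) := by
        rw [← Nat.cast_add, ← Nat.choose_succ_succ]
      rw [this]; ring
  | succ q ih =>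
    intro xs r k hlen
    match xs with
    | a :: b :: rest =>
      have h2 : (b :: rest).length = q + 1 := by
        simp only [List.length_cons] at hlen ⊢; omega
      simp only [pvPass, csum]
      rw [ih (b :: rest) r (k + 1) h2]
      simp only [List.headI, csum]
      have : (Nat.choose (r + 1) (k + 1) : Int) = (Nat.choose r k : Int) + (Nat.choose r (k + 1) : Int) := by
        rw [← Nat.cast_add, ← Nat.choose_succ_succ]
      rw [this]; ring

theorem pass_csum_zero (xs : List Int) (p r : Nat) (hlen : xs.length = p + 1) :
    csum r 0 (pvPass xs p) = csum (r + 1) 0 xs := by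
  cases p with
  | zero =>
    match xs with
    | [a] => simp [pvPass_zero, csum]
  | succ q =>
    match xs with
    | a :: b :: rest =>
      have h2 : (b :: rest).length = q + 1 := by
        simp only [List.length_cons] at hlen ⊢; omega
      simp only [pvPass, csum]
      rw [pass_csum_succ q (b :: rest) r 0 h2]
      simp only [List.headI, Nat.choose_zero_right, csum]
      push_cast
      ring

theorem outer_head (n : Nat) : ∀ (xs : List Int), n + 1 ≤ xs.length →
    List.getD (pvOuter xs (n + 1)) 0 0 = csum n 0 (xs.take (n + 1)) := by
  induction n with
  | zero =>
    intro xs hlen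
    match xs with
    | a :: t =>
      show List.getD (pvPass (a :: t) 0) 0 0 = _
      rw [pvPass_zero]
      simp [csum]
  | succ n ih =>
    intro xs hlen
    show List.getD (pvOuter (pvPass xs (n + 1)) (n + 1)) 0 0 = _
    rw [ih (pvPass xs (n + 1)) (by rw [pvPass_length]; omega)]
    have h1 : (pvPass xs (n + 1)).take (n + 1) = ((pvPass xs (n + 1)).take (n + 2)).take (n + 1) := by
      rw [List.take_take]; congr 1; omega
    have h2 : (pvPass xs (n + 1)).take (n + 2) = pvPass (xs.take (n + 2)) (n + 1) :=
      pass_take (n + 1) xs hlen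
    have hys : (xs.take (n + 2)).length = n + 2 := by simp [List.length_take]; omega
    calc csum n 0 ((pvPass xs (n + 1)).take (n + 1))
        = csum n 0 ((pvPass (xs.take (n + 2)) (n + 1)).take (n + 1)) := by rw [h1, h2]
      _ = csum n 0 (pvPass (xs.take (n + 2)) (n + 1)) := by
          rw [csum_take n (pvPass (xs.take (n + 2)) (n + 1))]
      _ = csum (n + 1) 0 (xs.take (n + 2)) := pass_csum_zero _ (n + 1) n (by rw [hys])

theorem choose_step (r k : Nat) (hk : k ≤ r) :
    PySem.Int.floordiv ((Nat.choose r k : Int) * (((r : Int) + 1) - 1 - (k : Int))) ((k : Int) + 1) =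
      (Nat.choose r (k + 1) : Int) := by
  have h1 : ((r : Int) + 1) - 1 - (k : Int) = ((r - k : Nat) : Int) := by omega
  have h2 : (Nat.choose r k : Int) * ((r - k : Nat) : Int) = ((Nat.choose r k * (r - k) : Nat) : Int) := by
    push_cast; ring
  have h3 : ((k : Int) + 1) = (((k + 1 : Nat)) : Int) := by push_cast; ring
  rw [h1, h2, h3, PySem.Int.floordiv_natCast]
  have h4 : Nat.choose r k * (r - k) = Nat.choose r (k + 1) * (k + 1) :=
    (Nat.choose_succ_right_eq r k).symm
  rw [h4, Nat.mul_div_cancel _ (by omega : 0 < k + 1)]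

theorem altLoop_eq (r : Nat) (S : Int) : ∀ (cs : List Char) (k : Nat) (total : Int),
    k + cs.length = r + 1 →
    pvAltLoop S ((r : Int) + 1) cs k (Nat.choose r k : Int) total =
      total + csum r k (cs.map (fun c => S + (c.toNat : Int) - 97)) := by
  intro cs
  induction cs with
  | nil => intro k total _; simp [pvAltLoop, csum]
  | cons ch rest ih =>
    intro k total hk
    have hkr : k ≤ r := by simp at hk; omega
    simp only [pvAltLoop]
    rw [choose_step r k hkr]
    rw [ih (k + 1) _ (by simp at hk ⊢; omega)]
    simp only [List.map_cons, csum]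
    ring

-- ===== VERDICT (by name: the statement is the Claim_ definition above) =====
theorem fate_spec : Claim_equal_fate := by
  intro N S _ hpre
  unfold Spec_fate fate fate_alt Pre_fate at *
  set L := N.toList with hL
  set n := L.length with hn
  have hnn : (pvToNum N S).length = n - 1 := by
    simp [pvToNum, List.length_take, ← hL, ← hn]
  set r : Nat := n - 2 with hr
  have hfa : ((n : Int) - 1) = ((r : Int) + 1) := by omega
  have hlen : r + 1 ≤ (pvToNum N S).length := by omega
  have hA : PySem.List.pyGetD (pvOuter (pvToNum N S) (pvToNum N S).length) 0 0 =
      csum r 0 ((pvToNum N S).take (r + 1)) := by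
    rw [PySem.List.pyGetD_zero]
    have : (pvToNum N S).length = r + 1 := by omega
    rw [this]
    exact outer_head r (pvToNum N S) (by omega)
  have hB : pvAltLoop S ((n : Int) - 1) (L.take (n - 1)) 0 1 0 =
      csum r 0 ((L.take (n - 1)).map (fun c => S + (c.toNat : Int) - 97)) := by
    have h := altLoop_eq r S (L.take (n - 1)) 0 0 (by simp [List.length_take, ← hn]; omega)
    rw [Nat.choose_zero_right, Nat.cast_one] at h
    rw [hfa, h]; ring
  show PySem.List.pyGetD (pvOuter (pvToNum N S) (pvToNum N S).length) 0 0 =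
      pvAltLoop S ((L.length : Int) - 1) (L.take (L.length - 1)) 0 1 0
  rw [hA, ← hn, hB]
  have : (pvToNum N S).take (r + 1) = pvToNum N S := List.take_of_length_le (by omega)
  rw [this]
  rfl
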